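-- pv_equiv track=rewrite | github.com/soob511/algostudy | 2024/0122_할인행사/PS_할인행사_이길상.py | solution
-- ===== SOURCE A (Python) =====
-- from collections import deque
--
-- def check(hashmap, required):
--     for food, number in required:
--         if food not in hashmap or hashmap[food] < number:
--             return False
--
--     return True
--
-- def solution(want, number, discount):
--
--     hashmap = dict()
--     queue = deque()
--
--     required = [(want[i], number[i]) for i in range(len(number))]
--
--     for food in want:
--         hashmap[food] = 0
--
--     # 첫 10개 기록
--     for food in discount[:10]:
--         if food not in hashmap:
--             hashmap[food] = 0
--         queue.append(food)
--         hashmap[food] += 1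
--
--     # 첫 10개가 조건을 만족하는지 체크
--     result = 1 if check(hashmap, required) else 0
--
--     # 나머지 할인정보 하나씩 확인하면서 큐와 해시맵에 기록
--     for food in discount[10:]:
--         if food not in hashmap:
--             hashmap[food] = 0
--         queue.append(food)
--         hashmap[food] += 1
--
--         poped = queue.popleft()
--         hashmap[poped] -= 1
--
--         # 조건을 만족하는지 체크
--         if check(hashmap, required):
--             result += 1
--
--     return result
-- ===== SOURCE B (Python) =====
-- def solution(want, number, discount):
--     # Deduplicate requirements: for each wanted food keep the largest required count.
--     req = {}
--     for f, n in zip(want, number):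
--         if f not in req or n > req[f]:
--             req[f] = n
--     k = len(req)
--     cnt = {}
--     sat = sum(1 for n in req.values() if n <= 0)
--     def add(f, d):
--         nonlocal sat
--         if f in req:
--             before = cnt.get(f, 0)
--             after = before + d
--             cnt[f] = after
--             n = req[f]
--             if before < n <= after:
--                 sat += 1
--             elif after < n <= before:
--                 sat -= 1
--     for f in discount[:10]:
--         add(f, 1)
--     result = 1 if sat == k else 0
--     for i in range(10, len(discount)):
--         add(discount[i], 1)
--         add(discount[i - 10], -1)
--         if sat == k:
--             result += 1
--     return result
-- ===== Notes on version B (the rewrite author's own statement) =====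
-- stated objective: faster
-- what changed: A rebuilds and rescans the whole requirement list for every window position (check() iterates all requirements per step); B deduplicates the requirements into a max-count dict once and maintains an O(1)-updatable counter of currently satisfied requirements while sliding the window, so each step costs O(1) instead of O(m).
-- outside the precondition, e.g. on solution(['a'], [1, 2], ['a']): A raises IndexError, B returns 1
import Mathlib
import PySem

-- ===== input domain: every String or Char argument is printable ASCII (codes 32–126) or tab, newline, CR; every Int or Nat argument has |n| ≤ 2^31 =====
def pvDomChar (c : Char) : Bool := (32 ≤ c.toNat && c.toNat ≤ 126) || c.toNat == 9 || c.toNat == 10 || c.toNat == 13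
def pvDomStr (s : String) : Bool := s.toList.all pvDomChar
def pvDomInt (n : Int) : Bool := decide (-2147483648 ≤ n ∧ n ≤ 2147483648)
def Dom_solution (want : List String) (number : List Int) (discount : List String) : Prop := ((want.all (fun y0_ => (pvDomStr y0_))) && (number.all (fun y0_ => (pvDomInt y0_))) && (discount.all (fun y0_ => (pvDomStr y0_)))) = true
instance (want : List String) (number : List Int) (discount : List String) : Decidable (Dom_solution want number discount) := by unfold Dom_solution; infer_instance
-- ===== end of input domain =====

-- B replaces A's per-window re-scan of all requirements by an O(1) incremental
-- satisfied-requirements counter over a sliding window (asymptotically faster on long discount lists).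

-- ===== PORT A =====
-- helper `check` of Source A
def check (hashmap : PySem.Dict String Int) (required : List (String × Int)) : Bool :=
  match required with
  | [] => true
  | (food, num) :: rest =>
      match hashmap.get? food with
      | none => false
      | some v => if v < num then false else check hashmap rest

def solution (want : List String) (number : List Int) (discount : List String) : Int :=
  -- required = [(want[i], number[i]) ...]; want[i] raises when len(number) > len(want): excluded by Pre_
  let required : List (String × Int) :=
    (PySem.List.pyRange 0 (number.length : Int) 1).map (fun i =>
      (PySem.List.pyGetD want i "", PySem.List.pyGetD number i 0))
  let hashmap : PySem.Dict String Int :=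
    want.foldl (fun h food => h.insert food 0) PySem.Dict.empty
  -- first 10 foods
  let hq := (PySem.List.slice discount (some 0) (some 10)).foldl
    (fun (hq : PySem.Dict String Int × List String) food =>
      let h := if hq.1.contains food then hq.1 else hq.1.insert food 0
      let q := hq.2 ++ [food]
      (h.insert food (h.getD food 0 + 1), q))
    (hashmap, [])
  let result : Int := if check hq.1 required then 1 else 0
  -- the rest, sliding the deque
  let st := (PySem.List.slice discount (some 10) none).foldl
    (fun (st : PySem.Dict String Int × List String × Int) food =>
      let h := if st.1.contains food then st.1 else st.1.insert food 0
      let q := st.2.1 ++ [food]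
      let h := h.insert food (h.getD food 0 + 1)
      let poped := q.headD ""          -- queue.popleft(): queue is nonempty here
      let q := q.tail
      let h := h.insert poped (h.getD poped 0 - 1)
      if check h required then (h, q, st.2.2 + 1) else (h, q, st.2.2))
    (hq.1, hq.2, result)
  st.2.2

-- ===== PORT B =====
-- helper `add` of Source B (returns the updated (cnt, sat))
def addAlt (req : PySem.Dict String Int) (cnt : PySem.Dict String Int) (sat : Int)
    (f : String) (d : Int) : PySem.Dict String Int × Int :=
  match req.get? f with
  | none => (cnt, sat)
  | some n =>
      let before := cnt.getD f 0
      let after := before + d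
      let cnt := cnt.insert f after
      if before < n ∧ n ≤ after then (cnt, sat + 1)
      else if after < n ∧ n ≤ before then (cnt, sat - 1)
      else (cnt, sat)

def solution_alt (want : List String) (number : List Int) (discount : List String) : Int :=
  let req : PySem.Dict String Int := (want.zip number).foldl
    (fun r p => if !r.contains p.1 || r.getD p.1 0 < p.2 then r.insert p.1 p.2 else r)
    PySem.Dict.empty
  let k : Int := (req.size : Int)
  let sat : Int := (req.values.countP (fun n => n ≤ 0) : Int)
  let cs := (PySem.List.slice discount none (some 10)).foldl
    (fun (cs : PySem.Dict String Int × Int) f => addAlt req cs.1 cs.2 f 1)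
    (PySem.Dict.empty, sat)
  let result : Int := if cs.2 = k then 1 else 0
  let st := (PySem.List.pyRange 10 (discount.length : Int) 1).foldl
    (fun (st : PySem.Dict String Int × Int × Int) i =>
      let c1 := addAlt req st.1 st.2.1 (PySem.List.pyGetD discount i "") 1
      let c2 := addAlt req c1.1 c1.2 (PySem.List.pyGetD discount (i - 10) "") (-1)
      if c2.2 = k then (c2.1, c2.2, st.2.2 + 1) else (c2.1, c2.2, st.2.2))
    (cs.1, cs.2, result)
  st.2.2

-- ===== PRECONDITION & SPEC =====
-- A raises IndexError (want[i]) when number is longer than want; everything else returns.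
def Pre_solution (want : List String) (number : List Int) (discount : List String) : Prop :=
  number.length ≤ want.length
instance (want : List String) (number : List Int) (discount : List String) : Decidable (Pre_solution want number discount) := by unfold Pre_solution; infer_instance
def pvWitness_solution : List String × List Int × List String :=
  (["a", "b"], [2, 1], ["a", "a", "b", "c"])

def Spec_solution (want : List String) (number : List Int) (discount : List String) (out : Int) : Prop := out = solution_alt want number discount
instance (want : List String) (number : List Int) (discount : List String) (out : Int) : Decidable (Spec_solution want number discount out) := by unfold Spec_solution; infer_instance

-- ===== CLAIM (what is proved, stated in full; the proofs are below) =====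
def Claim_equal_solution : Prop := ∀ (want : List String) (number : List Int) (discount : List String), Dom_solution want number discount → Pre_solution want number discount → Spec_solution want number discount (solution want number discount)


-- ===== LEMMAS AND PROOFS =====

-- window-count function of a window
def cf (q : List String) : String → Int := fun g => (q.count g : Int)

-- "all requirements met" for counts c
def okW (required : List (String × Int)) (c : String → Int) : Bool :=
  required.all (fun p => !decide (c p.1 < p.2))

-- number of satisfied windows produced by sliding window q over the remaining foods
def countOk (required : List (String × Int)) (q : List String) : List String → Int
  | [] => 0
  | r :: rest =>
      (if okW required (cf (q.tail ++ [r])) then 1 else 0) + countOk required (q.tail ++ [r]) rest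

-- each pair (entering, leaving) is consistent with the current window
def chain (q : List String) : List (String × String) → Prop
  | [] => True
  | (x, y) :: ps => (∃ t, q = y :: t) ∧ chain (q.tail ++ [x]) ps

-- number of requirement entries of req satisfied by counts c
def satC (req : PySem.Dict String Int) (c : String → Int) : Int :=
  (req.items.countP (fun p => decide (p.2 ≤ c p.1)) : Int)

-- the option-valued "running max requirement for key f" of Source B's req loop
def collect (f : String) (o : Option Int) : List (String × Int) → Option Int
  | [] => o
  | p :: zs =>
      collect f (if p.1 = f then some (match o with | none => p.2 | some m => max m p.2) else o) zs

lemma check_eq_all (required : List (String × Int)) (h : PySem.Dict String Int) (c : String → Int)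
    (hc : ∀ p ∈ required, h.get? p.1 = some (c p.1)) :
    check h required = okW required c := by
  induction required with
  | nil => rfl
  | cons p rest ih =>
      obtain ⟨f, n⟩ := p
      have h1 := hc (f, n) (by simp)
      simp only [check, okW, List.all_cons] at *
      rw [h1]
      by_cases hlt : c f < n
      · simp [hlt]
      · simp only [hlt]
        exact (by simpa using ih (fun p hp => hc p (List.mem_cons_of_mem _ hp)))

lemma bumpA (h : PySem.Dict String Int) (q want : List String) (food : String)
    (hInv : ∀ f ∈ want, h.get? f = some ((q.count f : Int))) :
    ∀ f ∈ want,
      ((if h.contains food then h else h.insert food 0).insert food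
        ((if h.contains food then h else h.insert food 0).getD food 0 + 1)).get? f
      = some (((q ++ [food]).count f : Int)) := by
  intro f hf
  by_cases hfx : f = food
  · subst hfx
    have h1 := hInv f hf
    have hcont : h.contains f = true := by
      rw [PySem.Dict.contains_eq_isSome_get?, h1]; rfl
    rw [if_pos hcont, PySem.Dict.get?_insert_self,
      PySem.Dict.getD_of_get?_eq_some _ _ h1]
    have : (q ++ [f]).count f = q.count f + 1 := by
      simp [List.count_append]
    rw [this]; push_cast; ring_nf
  · have hne : food ≠ f := fun e => hfx e.symm
    have hcnt : (q ++ [food]).count f = q.count f := by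
      simp [List.count_append, List.count_singleton, hfx, Ne.symm hfx]
    rw [PySem.Dict.get?_insert_of_ne _ _ hfx, hcnt]
    by_cases hc : h.contains food
    · rw [if_pos hc]; exact hInv f hf
    · rw [if_neg hc, PySem.Dict.get?_insert_of_ne _ _ hfx]; exact hInv f hf

lemma dropA (h : PySem.Dict String Int) (t want : List String) (p : String)
    (hInv : ∀ f ∈ want, h.get? f = some (((p :: t).count f : Int))) :
    ∀ f ∈ want, (h.insert p (h.getD p 0 - 1)).get? f = some ((t.count f : Int)) := by
  intro f hf
  by_cases hfp : f = p
  · subst hfp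
    have h1 := hInv f hf
    rw [PySem.Dict.get?_insert_self, PySem.Dict.getD_of_get?_eq_some _ _ h1]
    have : (f :: t).count f = t.count f + 1 := by simp [List.count_cons]
    rw [this]; push_cast; ring_nf
  · have hcnt : (p :: t).count f = t.count f := by
      simp [List.count_cons, hfp, Ne.symm hfp]
    rw [PySem.Dict.get?_insert_of_ne _ _ hfp, hInv f hf, hcnt]

lemma foldl_insert0 (l : List String) :
    ∀ (d : PySem.Dict String Int) (f : String),
      (l.foldl (fun h food => h.insert food 0) d).get? f = if f ∈ l then some 0 else d.get? f := by
  induction l with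
  | nil => simp
  | cons x xs ih =>
      intro d f
      simp only [List.foldl_cons, ih, List.mem_cons]
      by_cases hx : f ∈ xs
      · simp [hx]
      · by_cases hfx : f = x
        · simp [hx, hfx, PySem.Dict.get?_insert_self]
        · simp [hx, hfx, PySem.Dict.get?_insert_of_ne _ _ hfx]

lemma growA (want : List String) :
    ∀ (l : List String) (h : PySem.Dict String Int) (q : List String),
    (∀ f ∈ want, h.get? f = some ((q.count f : Int))) →
    (l.foldl (fun (hq : PySem.Dict String Int × List String) food =>
        let h := if hq.1.contains food then hq.1 else hq.1.insert food 0
        let q := hq.2 ++ [food]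
        (h.insert food (h.getD food 0 + 1), q)) (h, q)).2 = q ++ l ∧
    (∀ f ∈ want, (l.foldl (fun (hq : PySem.Dict String Int × List String) food =>
        let h := if hq.1.contains food then hq.1 else hq.1.insert food 0
        let q := hq.2 ++ [food]
        (h.insert food (h.getD food 0 + 1), q)) (h, q)).1.get? f = some (((q ++ l).count f : Int))) := by
  intro l
  induction l with
  | nil => intro h q hInv; simpa using hInv
  | cons x xs ih =>
      intro h q hInv
      have hb := bumpA h q want x hInv
      have := ih _ (q ++ [x]) hb
      simpa [List.append_assoc] using this

lemma slideA (want : List String) (required : List (String × Int))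
    (hrw : ∀ p ∈ required, p.1 ∈ want) :
    ∀ (rest : List String) (h : PySem.Dict String Int) (q : List String) (res : Int),
    (∀ f ∈ want, h.get? f = some ((q.count f : Int))) → q ≠ [] →
    (rest.foldl (fun (st : PySem.Dict String Int × List String × Int) food =>
      let h := if st.1.contains food then st.1 else st.1.insert food 0
      let q := st.2.1 ++ [food]
      let h := h.insert food (h.getD food 0 + 1)
      let poped := q.headD ""
      let q := q.tail
      let h := h.insert poped (h.getD poped 0 - 1)
      if check h required then (h, q, st.2.2 + 1) else (h, q, st.2.2)) (h, q, res)).2.2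
    = res + countOk required q rest := by
  intro rest
  induction rest with
  | nil => intro h q res _ _; simp [countOk]
  | cons r rs ih =>
      intro h q res hInv hq
      obtain ⟨p, t, rfl⟩ : ∃ p t, q = p :: t := by
        cases q with
        | nil => exact absurd rfl hq
        | cons a b => exact ⟨a, b, rfl⟩
      have hb := bumpA h (p :: t) want r hInv
      have hmid : ∀ f ∈ want,
          ((if h.contains r then h else h.insert r 0).insert r
            ((if h.contains r then h else h.insert r 0).getD r 0 + 1)).get? f
          = some (((p :: (t ++ [r])).count f : Int)) := by
        simpa using hb
      have hd := dropA _ (t ++ [r]) want p hmid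
      have hchk := check_eq_all required _ (cf (t ++ [r]))
        (fun pr hpr => hd pr.1 (hrw pr hpr))
      -- the new state after one step
      have hne : (t ++ [r] : List String) ≠ [] := by simp
      simp only [List.foldl_cons, List.cons_append, List.headD_cons, List.tail_cons]
      rw [hchk]
      by_cases hok : okW required (cf (t ++ [r])) = true
      · rw [if_pos hok, ih _ (t ++ [r]) (res + 1) hd hne]
        simp only [countOk, List.tail_cons]
        simp [hok]; ring
      · rw [if_neg hok, ih _ (t ++ [r]) res hd hne]
        simp only [countOk, List.tail_cons]
        simp [hok]

lemma req_get? (f : String) :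
    ∀ (zs : List (String × Int)) (r0 : PySem.Dict String Int),
    (zs.foldl (fun r p => if !r.contains p.1 || r.getD p.1 0 < p.2 then r.insert p.1 p.2 else r) r0).get? f
      = collect f (r0.get? f) zs := by
  intro zs
  induction zs with
  | nil => intro r0; rfl
  | cons p zs ih =>
      intro r0
      obtain ⟨a, v⟩ := p
      simp only [List.foldl_cons, collect, ih]
      congr 1
      by_cases haf : a = f
      · subst haf
        by_cases hc : r0.contains a = true
        · obtain ⟨m, hm⟩ : ∃ m, r0.get? a = some m := by
            rw [PySem.Dict.contains_eq_isSome_get?] at hc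
            exact Option.isSome_iff_exists.mp hc
          have hgd : r0.getD a 0 = m := PySem.Dict.getD_of_get?_eq_some _ _ hm
          by_cases hlt : m < v
          · simp only [hc, hgd, hlt, Bool.not_true, Bool.false_or, decide_true, if_true,
              PySem.Dict.get?_insert_self, hm]
            simp [max_eq_right (le_of_lt hlt)]
          · simp only [hc, hgd, hlt, Bool.not_true, Bool.false_or, decide_false, if_false, hm]
            simp [hm, max_eq_left (not_lt.mp hlt)]
        · have hget : r0.get? a = none := by
            rw [PySem.Dict.contains_eq_isSome_get?] at hc
            simpa using hc
          simp [hc, hget, PySem.Dict.get?_insert_self]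
      · have h1 : ∀ (r : PySem.Dict String Int) v', (r.insert a v').get? f = r.get? f :=
          fun r v' => PySem.Dict.get?_insert_of_ne _ _ (fun e => haf (e.symm ▸ rfl))
        split <;> simp [h1, haf]

lemma collect_none_iff (f : String) :
    ∀ (zs : List (String × Int)) (o : Option Int),
    collect f o zs = none ↔ (o = none ∧ ∀ v, (f, v) ∉ zs) := by
  intro zs
  induction zs with
  | nil => intro o; simp [collect]
  | cons p zs ih =>
      intro o
      obtain ⟨a, v⟩ := p
      simp only [collect, ih, List.mem_cons]
      by_cases haf : a = f
      · subst haf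
        simp only [if_pos rfl]
        constructor
        · rintro ⟨h1, -⟩; cases o <;> simp_all
        · rintro ⟨-, h2⟩; exact (h2 v (Or.inl rfl)).elim
      · simp only [if_neg haf]
        constructor
        · rintro ⟨h1, h2⟩
          exact ⟨h1, fun w => by
            intro hw
            rcases hw with h | h
            · exact haf (by injection h with e1 e2; exact e1.symm) |>.elim
            · exact h2 w h⟩
        · rintro ⟨h1, h2⟩
          exact ⟨h1, fun w hw => h2 w (Or.inr hw)⟩

lemma collect_some_spec (f : String) :
    ∀ (zs : List (String × Int)) (o : Option Int) (n : Int),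
    collect f o zs = some n →
    (o = some n ∨ (f, n) ∈ zs) ∧ (∀ v, (f, v) ∈ zs → v ≤ n) ∧ (∀ m, o = some m → m ≤ n) := by
  intro zs
  induction zs with
  | nil => intro o n h; simp [collect] at h; exact ⟨Or.inl h, by simp, fun m hm => by rw [h] at hm; injection hm with e; omega⟩
  | cons p zs ih =>
      intro o n h
      obtain ⟨a, v⟩ := p
      simp only [collect] at h
      by_cases haf : a = f
      · subst haf
        rw [if_pos rfl] at h
        have hs := ih _ n h
        obtain ⟨h1, h2, h3⟩ := hs
        have hv : v ≤ n := by
          cases o with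
          | none => exact h3 v rfl
          | some m => have := h3 (max m v) rfl; omega
        refine ⟨?_, ?_, ?_⟩
        · rcases h1 with h1 | h1
          · cases o with
            | none =>
                injection h1 with e
                exact Or.inr (by rw [← e]; exact List.mem_cons_self)
            | some m =>
                injection h1 with e
                simp only [] at e
                by_cases hmv : m ≤ v
                · rw [max_eq_right hmv] at e
                  exact Or.inr (by rw [← e]; exact List.mem_cons_self)
                · rw [max_eq_left (by omega)] at e
                  exact Or.inl (by rw [e])
          · exact Or.inr (List.mem_cons_of_mem _ h1)
        · intro w hw
          rcases List.mem_cons.mp hw with hw | hw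
          · injection hw with e1 e2; omega
          · exact h2 w hw
        · intro m hm
          subst hm
          have := h3 (max m v) rfl; omega
      · rw [if_neg haf] at h
        obtain ⟨h1, h2, h3⟩ := ih _ n h
        refine ⟨?_, ?_, h3⟩
        · rcases h1 with h1 | h1
          · exact Or.inl h1
          · exact Or.inr (List.mem_cons_of_mem _ h1)
        · intro w hw
          rcases List.mem_cons.mp hw with hw | hw
          · exact absurd (by injection hw with e1 e2; exact e1.symm) haf
          · exact h2 w hw

lemma all_iff_req (zs : List (String × Int)) (c : String → Int) :
    (okW zs c = true) ↔ (∀ f n, collect f none zs = some n → n ≤ c f) := by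
  constructor
  · intro hall f n hcol
    have := (collect_some_spec f zs none n hcol).1
    rcases this with h | h
    · exact absurd h (by simp)
    · have := (List.all_eq_true.mp hall) _ h
      simp at this; omega
  · intro hc
    rw [okW, List.all_eq_true]
    rintro ⟨f, v⟩ hp
    cases hcol : collect f none zs with
    | none =>
        have := (collect_none_iff f zs none).mp hcol
        exact absurd hp (this.2 v)
    | some n =>
        have h2 := (collect_some_spec f zs none n hcol).2.1 v hp
        have := hc f n hcol
        simp; omega

lemma nodup_req :
    ∀ (zs : List (String × Int)) (r0 : PySem.Dict String Int), r0.keys.Nodup →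
    (zs.foldl (fun r p => if !r.contains p.1 || r.getD p.1 0 < p.2 then r.insert p.1 p.2 else r) r0).keys.Nodup := by
  intro zs
  induction zs with
  | nil => intro r0 h; exact h
  | cons p zs ih =>
      intro r0 h
      simp only [List.foldl_cons]
      split
      · exact ih _ (PySem.Dict.nodup_keys_insert _ _ _ h)
      · exact ih _ h

lemma countP_int_update (l : List (String × Int)) (hnd : (l.map (·.1)).Nodup)
    (f : String) (n : Int) (hmem : (f, n) ∈ l) (P P' : String × Int → Bool)
    (hagree : ∀ p ∈ l, p.1 ≠ f → P' p = P p) :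
    (l.countP P' : Int) = (l.countP P : Int)
      + (if P' (f, n) then 1 else 0) - (if P (f, n) then 1 else 0) := by
  induction l with
  | nil => simp at hmem
  | cons p t ih =>
      simp only [List.map_cons, List.nodup_cons] at hnd
      by_cases hpf : p.1 = f
      · have hpe : p = (f, n) := by
          rcases List.mem_cons.mp hmem with h | h
          · exact h.symm
          · exact absurd (by simpa [hpf] using List.mem_map_of_mem (f := (·.1)) h) (by simpa [hpf] using hnd.1)
        subst hpe
        have ht : t.countP P' = t.countP P := by
          apply List.countP_congr
          intro q hq
          have hqf : q.1 ≠ f := by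
            intro e
            exact hnd.1 (by simpa [e] using List.mem_map_of_mem (f := (·.1)) hq)
          rw [hagree q (List.mem_cons_of_mem _ hq) hqf]
        simp only [List.countP_cons, ht]
        split_ifs <;> push_cast <;> omega
      · have hmem' : (f, n) ∈ t := by
          rcases List.mem_cons.mp hmem with h | h
          · exact absurd (by rw [← h]) hpf
          · exact h
        have := ih hnd.2 hmem' (fun q hq hqf => hagree q (List.mem_cons_of_mem _ hq) hqf)
        simp only [List.countP_cons, hagree p (List.mem_cons_self) hpf]
        split_ifs at this ⊢ <;> push_cast at this ⊢ <;> omega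

lemma satC_eq_size_iff (req : PySem.Dict String Int) (hnd : req.keys.Nodup) (c : String → Int) :
    (satC req c = (req.size : Int)) ↔ ∀ f n, req.get? f = some n → n ≤ c f := by
  unfold satC
  rw [show (req.size : Int) = (req.items.length : Int) from rfl]
  rw [Int.natCast_inj]
  rw [List.countP_eq_length]
  constructor
  · intro h f n hget
    have := h _ (PySem.Dict.mem_items_of_get?_eq_some _ hget)
    simpa using this
  · intro h p hp
    have := h p.1 p.2 (PySem.Dict.get?_of_mem_items _ hp hnd)
    simpa using this

lemma addAlt_spec (req cnt : PySem.Dict String Int) (c : String → Int) (f : String) (d : Int)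
    (hnd : req.keys.Nodup)
    (hc : ∀ g n, req.get? g = some n → cnt.getD g 0 = c g) :
    (addAlt req cnt (satC req c) f d).2 = satC req (fun g => if g = f then c g + d else c g) ∧
    (∀ g n, req.get? g = some n →
      (addAlt req cnt (satC req c) f d).1.getD g 0 = (if g = f then c g + d else c g)) := by
  cases hf : req.get? f with
  | none =>
      have hA : addAlt req cnt (satC req c) f d = (cnt, satC req c) := by
        unfold addAlt; rw [hf]
      rw [hA]
      refine ⟨?_, ?_⟩
      · dsimp only
        unfold satC
        congr 1
        apply List.countP_congr
        intro p hp
        have hpf : p.1 ≠ f := by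
          intro e
          have := PySem.Dict.get?_of_mem_items _ hp hnd
          rw [e, hf] at this; cases this
        simp [hpf]
      · intro g m hget
        have hgf : g ≠ f := fun e => by rw [e, hf] at hget; cases hget
        simp [hgf, hc g m hget]
  | some n =>
      have hbef : cnt.getD f 0 = c f := hc f n hf
      have hmem : (f, n) ∈ req.items := PySem.Dict.mem_items_of_get?_eq_some _ hf
      have hkeys : (req.items.map (·.1)).Nodup := hnd
      have hupd := countP_int_update req.items hkeys f n hmem
        (fun p => decide (p.2 ≤ c p.1))
        (fun p => decide (p.2 ≤ (if p.1 = f then c p.1 + d else c p.1)))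
        (fun p _ hpf => by simp [hpf])
      have hA : addAlt req cnt (satC req c) f d =
          (if cnt.getD f 0 < n ∧ n ≤ cnt.getD f 0 + d
            then (cnt.insert f (cnt.getD f 0 + d), satC req c + 1)
            else if cnt.getD f 0 + d < n ∧ n ≤ cnt.getD f 0
              then (cnt.insert f (cnt.getD f 0 + d), satC req c - 1)
              else (cnt.insert f (cnt.getD f 0 + d), satC req c)) := by
        unfold addAlt; rw [hf]
      rw [hA]
      have hsat : ((req.items.countP (fun p => decide (p.2 ≤ (if p.1 = f then c p.1 + d else c p.1)))) : Int)
          = satC req c + (if (n ≤ c f + d : Prop) then 1 else 0) - (if (n ≤ c f : Prop) then 1 else 0) := by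
        unfold satC
        rw [hupd]
        simp only [if_pos rfl, decide_eq_true_eq]
        split_ifs <;> push_cast <;> omega
      have hsat' : satC req (fun g => if g = f then c g + d else c g)
          = satC req c + (if (n ≤ c f + d : Prop) then 1 else 0) - (if (n ≤ c f : Prop) then 1 else 0) := hsat
      refine ⟨?_, ?_⟩
      · rw [hsat', hbef]
        generalize satC req c = S
        split_ifs <;> dsimp only <;> omega
      · intro g m hget
        by_cases hgf : g = f
        · subst hgf
          split_ifs <;> dsimp only <;> simp_all [PySem.Dict.getD_insert, hbef]
        · split_ifs <;> dsimp only <;>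
            simp [PySem.Dict.getD_insert, hgf, hc g m hget]

lemma cf_append_singleton (q : List String) (x : String) :
    cf (q ++ [x]) = fun g => if g = x then cf q g + 1 else cf q g := by
  funext g
  by_cases hg : g = x <;>
    simp [cf, List.count_append, List.count_singleton, hg, Ne.symm] <;>
    push_cast <;> simp [hg]

lemma growB (req : PySem.Dict String Int) (hnd : req.keys.Nodup) :
    ∀ (l : List String) (cnt : PySem.Dict String Int) (q : List String),
    (∀ g n, req.get? g = some n → cnt.getD g 0 = ((q.count g : Int))) →
    (l.foldl (fun (cs : PySem.Dict String Int × Int) f => addAlt req cs.1 cs.2 f 1)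
        (cnt, satC req (cf q))).2 = satC req (cf (q ++ l)) ∧
    (∀ g n, req.get? g = some n →
      (l.foldl (fun (cs : PySem.Dict String Int × Int) f => addAlt req cs.1 cs.2 f 1)
        (cnt, satC req (cf q))).1.getD g 0 = (((q ++ l).count g : Int))) := by
  intro l
  induction l with
  | nil => intro cnt q hc; exact ⟨by simp, by simpa using hc⟩
  | cons x xs ih =>
      intro cnt q hc
      have hs := addAlt_spec req cnt (cf q) x 1 hnd hc
      have hcf : (fun g => if g = x then cf q g + 1 else cf q g) = cf (q ++ [x]) :=
        (cf_append_singleton q x).symm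
      rw [hcf] at hs
      have hstep : (addAlt req cnt (satC req (cf q)) x 1)
          = ((addAlt req cnt (satC req (cf q)) x 1).1, satC req (cf (q ++ [x]))) := by
        rw [← hs.1]
      simp only [List.foldl_cons]
      rw [hstep]
      have := ih (addAlt req cnt (satC req (cf q)) x 1).1 (q ++ [x])
        (fun g n hg => by
          rw [hs.2 g n hg]
          by_cases hgx : g = x
          · subst hgx; simp [cf, List.count_append]
          · simp [hgx, cf, List.count_append, List.count_eq_zero])
      simpa [List.append_assoc] using this

lemma chain_of_append : ∀ (rest w : List String), w ≠ [] → chain w (rest.zip (w ++ rest)) := by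
  intro rest
  induction rest with
  | nil => intro w _; simp [chain]
  | cons x r' ih =>
      intro w hw
      obtain ⟨p, t, rfl⟩ : ∃ p t, w = p :: t := by
        cases w with
        | nil => exact absurd rfl hw
        | cons a b => exact ⟨a, b, rfl⟩
      show chain (p :: t) ((x :: r').zip (p :: (t ++ x :: r')))
      refine ⟨⟨t, rfl⟩, ?_⟩
      have := ih (t ++ [x]) (by simp)
      simpa [List.append_assoc] using this

lemma cf_slide (q t : List String) (x y : String) (hq : q = y :: t) :
    (fun g => if g = y then (if g = x then cf q g + 1 else cf q g) + (-1)
              else (if g = x then cf q g + 1 else cf q g)) = cf (t ++ [x]) := by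
  subst hq
  funext g
  have hc1 : (((y :: t).count g : Int)) = (t.count g : Int) + (if g = y then 1 else 0) := by
    by_cases h : g = y <;> simp [List.count_cons, h, Ne.symm]
  have hc2 : ((((t ++ [x]).count g : Int))) = (t.count g : Int) + (if g = x then 1 else 0) := by
    by_cases h : g = x <;> simp [List.count_append, List.count_singleton', h, List.count_eq_zero, Ne.symm]
  simp only [cf, hc1, hc2]
  split_ifs <;> omega

lemma slideB (req : PySem.Dict String Int) (hnd : req.keys.Nodup)
    (required : List (String × Int)) (k : Int)
    (hk : ∀ c : String → Int, (satC req c = k) ↔ (okW required c = true)) :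
    ∀ (ps : List (String × String)) (cnt : PySem.Dict String Int) (res : Int) (q : List String),
    chain q ps →
    (∀ g n, req.get? g = some n → cnt.getD g 0 = (q.count g : Int)) →
    (ps.foldl (fun (st : PySem.Dict String Int × Int × Int) pr =>
        let c1 := addAlt req st.1 st.2.1 pr.1 1
        let c2 := addAlt req c1.1 c1.2 pr.2 (-1)
        if c2.2 = k then (c2.1, c2.2, st.2.2 + 1) else (c2.1, c2.2, st.2.2))
      (cnt, satC req (cf q), res)).2.2
    = res + countOk required q (ps.map (·.1)) := by
  intro ps
  induction ps with
  | nil => intro cnt res q _ _; simp [countOk]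
  | cons pr ps ih =>
      intro cnt res q hch hc
      obtain ⟨x, y⟩ := pr
      obtain ⟨⟨t, rfl⟩, hch'⟩ := hch
      have hchq : chain (t ++ [x]) ps := by simpa using hch'
      simp only [List.foldl_cons, List.map_cons]
      have hs1 := addAlt_spec req cnt (cf (y :: t)) x 1 hnd hc
      set A1 := addAlt req cnt (satC req (cf (y :: t))) x 1 with hA1
      rw [hs1.1]
      have hs2 := addAlt_spec req A1.1 (fun g => if g = x then cf (y :: t) g + 1 else cf (y :: t) g)
        y (-1) hnd hs1.2
      set A2 := addAlt req A1.1 (satC req (fun g => if g = x then cf (y :: t) g + 1 else cf (y :: t) g)) y (-1) with hA2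
      have hcf2 := cf_slide (y :: t) t x y rfl
      have hsat2 : A2.2 = satC req (cf (t ++ [x])) := by rw [hs2.1, hcf2]
      rw [hsat2]
      have hcof : ∀ g n, req.get? g = some n → A2.1.getD g 0 = (((t ++ [x]).count g : Int)) := by
        intro g n hg
        rw [hs2.2 g n hg]
        have := congrFun hcf2 g
        simpa [cf] using this
      by_cases hok : okW required (cf (t ++ [x])) = true
      · rw [if_pos ((hk _).mpr hok), ih _ _ (t ++ [x]) hchq hcof]
        simp only [countOk, List.tail_cons]
        simp [hok]; ring
      · rw [if_neg (fun e => hok ((hk _).mp e)), ih _ _ (t ++ [x]) hchq hcof]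
        simp only [countOk, List.tail_cons]
        simp [hok]

lemma zip_eq_map_range (d : List String) :
    (d.drop 10).zip d
      = (List.range (d.length - 10)).map (fun k => (d.getD (10 + k) "", d.getD k "")) := by
  apply List.ext_getElem
  · simp [List.length_zip, List.length_drop]
  · intro k h1 h2
    simp only [List.length_zip, List.length_drop] at h1
    have hk : k < d.length - 10 := by omega
    have h10k : 10 + k < d.length := by omega
    have hkd : k < d.length := by omega
    simp [List.getElem_zip, List.getElem_drop, List.getElem_map, List.getElem_range,
      List.getD_eq_getElem, h10k, hkd]

lemma pyRange_fold_pairs {σ : Type} (d : List String) (body : σ → String → String → σ) (init : σ) :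
    (PySem.List.pyRange 10 (d.length : Int) 1).foldl
        (fun st i => body st (PySem.List.pyGetD d i "") (PySem.List.pyGetD d (i - 10) "")) init
      = ((d.drop 10).zip d).foldl (fun st pr => body st pr.1 pr.2) init := by
  rw [PySem.List.pyRange_one, List.foldl_map, zip_eq_map_range, List.foldl_map]
  have hm : ((d.length : Int) - 10).toNat = d.length - 10 := by omega
  rw [hm]
  apply PySem.List.foldl_congr_mem
  intro st k hk
  have hk' : k < d.length - 10 := by simpa using hk
  have e1 : (10 : Int) + (k : Int) = ((10 + k : Nat) : Int) := by push_cast; ring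
  have e2 : (((10 + k : Nat) : Int)) - 10 = ((k : Nat) : Int) := by push_cast; ring
  rw [e1, e2, PySem.List.pyGetD_natCast, PySem.List.pyGetD_natCast]

lemma required_eq (want : List String) (number : List Int) (hpre : number.length ≤ want.length) :
    (PySem.List.pyRange 0 (number.length : Int) 1).map (fun i =>
      (PySem.List.pyGetD want i "", PySem.List.pyGetD number i 0)) = want.zip number := by
  apply List.ext_getElem
  · simp [PySem.List.length_pyRange_one, List.length_zip]
    omega
  · intro k h1 h2
    simp only [List.length_map, PySem.List.length_pyRange_one] at h1
    have hk : k < number.length := by omega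
    have hkw : k < want.length := by omega
    rw [List.getElem_map, PySem.List.getElem_pyRange_one]
    have e : (0 : Int) + (k : Int) = ((k : Nat) : Int) := by push_cast; ring
    rw [e, PySem.List.pyGetD_natCast, PySem.List.pyGetD_natCast]
    simp [List.getElem_zip, List.getD_eq_getElem, hk, hkw]

-- ===== VERDICT (by name: the statement is the Claim_ definition above) =====
theorem solution_spec : Claim_equal_solution := by
  intro want number discount _ hpre
  unfold Spec_solution
  simp only [solution, solution_alt]
  -- common names
  have hreq_eq := required_eq want number hpre
  rw [hreq_eq]
  set zs := want.zip number with hzs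
  set req := zs.foldl
    (fun r p => if !r.contains p.1 || r.getD p.1 0 < p.2 then r.insert p.1 p.2 else r)
    PySem.Dict.empty with hreqd
  -- slices
  have hs1 : PySem.List.slice discount (some 0) (some 10) = discount.take 10 := by
    rw [PySem.List.slice_zero_start, PySem.List.slice_to] <;> simp
  have hs2 : PySem.List.slice discount (some 10) none = discount.drop 10 := by
    rw [PySem.List.slice_from] <;> simp
  have hs3 : PySem.List.slice discount none (some 10) = discount.take 10 := by
    rw [PySem.List.slice_to] <;> simp
  rw [hs1, hs2, hs3]
  -- B-side setup
  have hnd : req.keys.Nodup := nodup_req zs PySem.Dict.empty (by simp)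
  have hgetreq : ∀ f, req.get? f = collect f none zs := by
    intro f; rw [hreqd, req_get?]; simp
  have hkiff : ∀ c : String → Int, (satC req c = ((req.size : Nat) : Int)) ↔ (okW zs c = true) := by
    intro c
    rw [satC_eq_size_iff req hnd c, all_iff_req zs c]
    constructor
    · intro h f n hc; exact h f n (by rw [hgetreq]; exact hc)
    · intro h f n hc; exact h f n (by rw [← hgetreq]; exact hc)
  have hsat0 : ((req.values.countP (fun n => n ≤ 0) : Nat) : Int) = satC req (cf []) := by
    unfold satC
    congr 1
    show (req.items.map (·.2)).countP _ = _
    rw [List.countP_map]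
    apply List.countP_congr
    intro p _
    simp [cf, Function.comp]
  have hc0 : ∀ g n, req.get? g = some n →
      (PySem.Dict.empty : PySem.Dict String Int).getD g 0 = ((([] : List String).count g : Int)) := by
    intro g n _; simp
  rw [hsat0]
  have hgB := growB req hnd (discount.take 10) PySem.Dict.empty [] hc0
  set BF := (discount.take 10).foldl
      (fun (cs : PySem.Dict String Int × Int) f => addAlt req cs.1 cs.2 f 1)
      (PySem.Dict.empty, satC req (cf [])) with hBF
  have hBF2 : BF = (BF.1, satC req (cf (discount.take 10))) := by
    have h2 := hgB.1
    simp only [List.nil_append] at h2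
    rw [← h2]
  have hcB : ∀ g n, req.get? g = some n →
      BF.1.getD g 0 = (((discount.take 10).count g : Int)) := by
    intro g n hg
    simpa using hgB.2 g n hg
  -- A-side setup
  have hd0 : ∀ f ∈ want,
      (want.foldl (fun h food => h.insert food 0) PySem.Dict.empty).get? f
        = some ((([] : List String).count f : Int)) := by
    intro f hf
    rw [foldl_insert0, if_pos hf]
    simp
  have hgA := growA want (discount.take 10)
    (want.foldl (fun h food => h.insert food 0) PySem.Dict.empty) [] hd0
  set AF := (discount.take 10).foldl
      (fun (hq : PySem.Dict String Int × List String) food =>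
        let h := if hq.1.contains food then hq.1 else hq.1.insert food 0
        let q := hq.2 ++ [food]
        (h.insert food (h.getD food 0 + 1), q))
      (want.foldl (fun h food => h.insert food 0) PySem.Dict.empty, []) with hAF
  have hAF2 : AF = (AF.1, discount.take 10) := by
    have h2 := hgA.1
    simp only [List.nil_append] at h2
    rw [← h2]
  have hcA : ∀ f ∈ want, AF.1.get? f = some (((discount.take 10).count f : Int)) := by
    intro f hf
    simpa using hgA.2 f hf
  -- the zip's foods are in want
  have hrw : ∀ p ∈ zs, p.1 ∈ want := by
    intro p hp
    exact List.of_mem_zip hp |>.1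
  -- first-window results agree
  have hchk0 : check AF.1 zs = okW zs (cf (discount.take 10)) :=
    check_eq_all zs AF.1 (cf (discount.take 10)) (fun p hp => hcA p.1 (hrw p hp))
  rw [hBF2, hAF2]
  simp only []
  rw [hchk0]
  -- turn B's index loop into a loop over (entering, leaving) pairs
  rw [pyRange_fold_pairs discount
    (fun (st : PySem.Dict String Int × Int × Int) x y =>
      let c1 := addAlt req st.1 st.2.1 x 1
      let c2 := addAlt req c1.1 c1.2 y (-1)
      if c2.2 = ((req.size : Nat) : Int) then (c2.1, c2.2, st.2.2 + 1) else (c2.1, c2.2, st.2.2))]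
  by_cases hlen : discount.length ≤ 10
  · -- no sliding: both loops are over the empty list
    have hdrop : discount.drop 10 = [] := by
      rw [List.drop_eq_nil_iff]; omega
    rw [hdrop]
    simp only [List.zip_nil_left, List.foldl_nil]
    by_cases hok : okW zs (cf (discount.take 10)) = true
    · rw [hok, if_pos ((hkiff _).mpr hok)]; simp
    · rw [Bool.not_eq_true] at hok
      have hBneq : ¬ (satC req (cf (discount.take 10)) = ((req.size : Nat) : Int)) := by
        intro e; have h := (hkiff _).mp e; rw [hok] at h; cases h
      rw [hok, if_neg hBneq]
      simp
  · -- sliding case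
    have hw0len : (discount.take 10).length = 10 := by
      rw [List.length_take]; omega
    have hw0ne : discount.take 10 ≠ [] := by
      intro e; rw [e] at hw0len; simp at hw0len
    have hchain : chain (discount.take 10) ((discount.drop 10).zip discount) := by
      have := chain_of_append (discount.drop 10) (discount.take 10) hw0ne
      rwa [List.take_append_drop] at this
    have hmapfst : ((discount.drop 10).zip discount).map (·.1) = discount.drop 10 := by
      apply List.map_fst_zip
      simp
    have hA := slideA want zs hrw (discount.drop 10) AF.1 (discount.take 10)
      (if okW zs (cf (discount.take 10)) = true then 1 else 0) hcA hw0ne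
    have hB := slideB req hnd zs ((req.size : Nat) : Int) hkiff
      ((discount.drop 10).zip discount) BF.1
      (if satC req (cf (discount.take 10)) = ((req.size : Nat) : Int) then 1 else 0)
      (discount.take 10) hchain hcB
    rw [hmapfst] at hB
    rw [hA, hB]
    congr 1
    by_cases hok : okW zs (cf (discount.take 10)) = true
    · rw [hok, if_pos ((hkiff _).mpr hok)]
      simp
    · rw [Bool.not_eq_true] at hok
      have hBneq : ¬ (satC req (cf (discount.take 10)) = ((req.size : Nat) : Int)) := by
        intro e; have h := (hkiff _).mp e; rw [hok] at h; cases h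
      rw [hok, if_neg hBneq]
      simp
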